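-- pv_equiv track=rewrite | github.com/MarceauSolutions/dev-sandbox | projects/shared/apollo-mcp/src/apollo_mcp/company_templates.py | detect_company_from_prompt
-- ===== SOURCE A (Python) =====
-- from typing import Dict, Any, List, Optional
--
-- def detect_company_from_prompt(prompt: str) -> Optional[str]:
--     """
--     Detect company context from natural language prompt.
--
--     Args:
--         prompt: Natural language prompt (e.g., "Naples HVAC for Southwest Florida Comfort")
--
--     Returns:
--         Company key or None if not detected
--     """
--     prompt_lower = prompt.lower()
--
--     # Check for explicit company mentions
--     if "southwest florida comfort" in prompt_lower or "swfl comfort" in prompt_lower: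
--         return "southwest_florida_comfort"
--
--     if "marceau solutions" in prompt_lower or "marceau" in prompt_lower:
--         return "marceau_solutions"
--
--     if "footer shipping" in prompt_lower or "footer" in prompt_lower:
--         return "footer_shipping"
--
--     # Check for industry/context clues
--     if any(keyword in prompt_lower for keyword in ["hvac", "air conditioning", "heating", "ac repair"]):
--         return "southwest_florida_comfort"
--
--     if any(keyword in prompt_lower for keyword in ["e-commerce", "shopify", "amazon seller", "online store"]):
--         return "footer_shipping"
--
--     # Default to Marceau Solutions for general small business searches
--     if any(keyword in prompt_lower for keyword in ["restaurant", "gym", "fitness", "small business"]):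
--         return "marceau_solutions"
--
--     return None
-- ===== SOURCE B (Python) =====
-- # Flat keyword table in ALPHABETICAL order; rank = priority of the original rule group
-- # (0 highest). One pass keeps the matching keyword of minimal rank; companies within a
-- # rank are identical, so min-rank selection reproduces the original first-branch priority.
-- _KEYWORDS = [
--     ("ac repair", 3, "southwest_florida_comfort"),
--     ("air conditioning", 3, "southwest_florida_comfort"),
--     ("amazon seller", 4, "footer_shipping"),
--     ("e-commerce", 4, "footer_shipping"),
--     ("fitness", 5, "marceau_solutions"),
--     ("footer", 2, "footer_shipping"),
--     ("footer shipping", 2, "footer_shipping"),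
--     ("gym", 5, "marceau_solutions"),
--     ("heating", 3, "southwest_florida_comfort"),
--     ("hvac", 3, "southwest_florida_comfort"),
--     ("marceau", 1, "marceau_solutions"),
--     ("marceau solutions", 1, "marceau_solutions"),
--     ("online store", 4, "footer_shipping"),
--     ("restaurant", 5, "marceau_solutions"),
--     ("shopify", 4, "footer_shipping"),
--     ("small business", 5, "marceau_solutions"),
--     ("southwest florida comfort", 0, "southwest_florida_comfort"),
--     ("swfl comfort", 0, "southwest_florida_comfort"),
-- ]
--
-- def detect_company_from_prompt(prompt: str):
--     prompt_lower = prompt.lower()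
--     best_rank = None
--     best_company = None
--     for keyword, rank, company in _KEYWORDS:
--         if keyword in prompt_lower and (best_rank is None or rank < best_rank):
--             best_rank, best_company = rank, company
--     return best_company
-- ===== Notes on version B (the rewrite author's own statement) =====
-- stated objective: alternative
-- what changed: Replaces the priority if-chain by a single pass over a flat, alphabetically ordered keyword table that keeps the matching keyword of minimal rule rank (min-selection with an accumulator instead of ordered early-return branches).
import Mathlib
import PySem

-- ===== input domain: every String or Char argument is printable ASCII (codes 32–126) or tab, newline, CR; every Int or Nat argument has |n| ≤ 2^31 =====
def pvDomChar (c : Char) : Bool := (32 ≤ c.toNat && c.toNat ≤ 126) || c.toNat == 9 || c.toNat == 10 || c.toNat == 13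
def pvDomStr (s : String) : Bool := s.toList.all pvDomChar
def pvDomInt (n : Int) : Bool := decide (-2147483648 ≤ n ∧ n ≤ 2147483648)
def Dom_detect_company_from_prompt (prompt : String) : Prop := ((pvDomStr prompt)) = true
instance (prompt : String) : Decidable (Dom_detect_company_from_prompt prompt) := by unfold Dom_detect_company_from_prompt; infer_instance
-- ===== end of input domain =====

-- B replaces A's priority if-chain by one pass over an alphabetically ordered flat keyword
-- table keeping the match of minimal rule rank (alternative decomposition, same cost).

-- ===== PORT A =====
def detect_company_from_prompt (prompt : String) : Option String :=
  let pl := PySem.Str.lower prompt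
  if PySem.Str.isIn "southwest florida comfort" pl || PySem.Str.isIn "swfl comfort" pl then
    some "southwest_florida_comfort"
  else if PySem.Str.isIn "marceau solutions" pl || PySem.Str.isIn "marceau" pl then
    some "marceau_solutions"
  else if PySem.Str.isIn "footer shipping" pl || PySem.Str.isIn "footer" pl then
    some "footer_shipping"
  else if ["hvac", "air conditioning", "heating", "ac repair"].any (fun k => PySem.Str.isIn k pl) then
    some "southwest_florida_comfort"
  else if ["e-commerce", "shopify", "amazon seller", "online store"].any (fun k => PySem.Str.isIn k pl) then
    some "footer_shipping"
  else if ["restaurant", "gym", "fitness", "small business"].any (fun k => PySem.Str.isIn k pl) then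
    some "marceau_solutions"
  else none

-- ===== PORT B =====
-- flat keyword table in alphabetical order; rank = priority of the original rule group
def pvKeywords : List (String × Nat × String) :=
  [ ("ac repair", 3, "southwest_florida_comfort"),
    ("air conditioning", 3, "southwest_florida_comfort"),
    ("amazon seller", 4, "footer_shipping"),
    ("e-commerce", 4, "footer_shipping"),
    ("fitness", 5, "marceau_solutions"),
    ("footer", 2, "footer_shipping"),
    ("footer shipping", 2, "footer_shipping"),
    ("gym", 5, "marceau_solutions"),
    ("heating", 3, "southwest_florida_comfort"),
    ("hvac", 3, "southwest_florida_comfort"),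
    ("marceau", 1, "marceau_solutions"),
    ("marceau solutions", 1, "marceau_solutions"),
    ("online store", 4, "footer_shipping"),
    ("restaurant", 5, "marceau_solutions"),
    ("shopify", 4, "footer_shipping"),
    ("small business", 5, "marceau_solutions"),
    ("southwest florida comfort", 0, "southwest_florida_comfort"),
    ("swfl comfort", 0, "southwest_florida_comfort") ]

def detect_company_from_prompt_alt (prompt : String) : Option String :=
  let prompt_lower := PySem.Str.lower prompt
  let best := pvKeywords.foldl
    (fun best r =>
      if PySem.Str.isIn r.1 prompt_lower &&
         (match best with
          | none => true
          | some p => decide (r.2.1 < p.1)) then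
        some r.2
      else best)
    (none : Option (Nat × String))
  best.map (fun b => b.2)

-- ===== PRECONDITION & SPEC =====
def Spec_detect_company_from_prompt (prompt : String) (out : Option String) : Prop := out = detect_company_from_prompt_alt prompt
instance (prompt : String) (out : Option String) : Decidable (Spec_detect_company_from_prompt prompt out) := by unfold Spec_detect_company_from_prompt; infer_instance

-- ===== CLAIM (what is proved, stated in full; the proofs are below) =====
def Claim_equal_detect_company_from_prompt : Prop := ∀ (prompt : String), Dom_detect_company_from_prompt prompt → Spec_detect_company_from_prompt prompt (detect_company_from_prompt prompt)

-- ===== LEMMAS AND PROOFS =====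

-- proof-only helpers: the abstract loop body of B, the rank of a best-so-far, the rank→company map
def pvStep (f : String → Bool) (best : Option (Nat × String)) (r : String × Nat × String) :
    Option (Nat × String) :=
  if f r.1 && (match best with | none => true | some p => decide (r.2.1 < p.1)) then some r.2 else best

def pvMr (o : Option (Nat × String)) : Nat := match o with | none => 1000 | some p => p.1

def pvRc : Nat → String
  | 0 => "southwest_florida_comfort"
  | 1 => "marceau_solutions"
  | 2 => "footer_shipping"
  | 3 => "southwest_florida_comfort"
  | 4 => "footer_shipping"
  | 5 => "marceau_solutions"
  | _ => ""

theorem pvMr_step_le (f : String → Bool) (best : Option (Nat × String)) (r : String × Nat × String)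
    (hr : r.2.1 ≤ 1000) : pvMr (pvStep f best r) ≤ pvMr best := by
  unfold pvStep
  split_ifs with h
  · cases best with
    | none => simpa [pvMr] using hr
    | some p =>
      simp only [Bool.and_eq_true, decide_eq_true_eq] at h
      simpa [pvMr] using le_of_lt h.2
  · exact le_rfl

theorem pvMr_foldl_le (f : String → Bool) (L : List (String × Nat × String))
    (hL : ∀ r ∈ L, r.2.1 ≤ 1000) (acc : Option (Nat × String)) :
    pvMr (L.foldl (pvStep f) acc) ≤ pvMr acc := by
  induction L generalizing acc with
  | nil => exact le_rfl
  | cons r L ih =>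
    calc pvMr (L.foldl (pvStep f) (pvStep f acc r)) ≤ pvMr (pvStep f acc r) :=
          ih (fun s hs => hL s (List.mem_cons_of_mem _ hs)) _
      _ ≤ pvMr acc := pvMr_step_le f acc r (hL r (List.mem_cons_self ..))

theorem pvMr_step_le_rank (f : String → Bool) (best : Option (Nat × String))
    (r : String × Nat × String) (hf : f r.1 = true) : pvMr (pvStep f best r) ≤ r.2.1 := by
  unfold pvStep
  cases best with
  | none => simp [hf, pvMr]
  | some p =>
    by_cases h : r.2.1 < p.1
    · simp [hf, h, pvMr]
    · simp only [hf, Bool.true_and, decide_eq_true_eq]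
      rw [if_neg h]
      simp [pvMr]; omega

theorem pvMr_foldl_le_of_mem (f : String → Bool) (L : List (String × Nat × String))
    (hL : ∀ r ∈ L, r.2.1 ≤ 1000) (kw : String) (i : Nat) (c : String)
    (hmem : (kw, i, c) ∈ L) (hf : f kw = true) (acc : Option (Nat × String)) :
    pvMr (L.foldl (pvStep f) acc) ≤ i := by
  induction L generalizing acc with
  | nil => cases hmem
  | cons r L ih =>
    rcases List.mem_cons.1 hmem with heq | hmem'
    · subst heq
      calc pvMr (L.foldl (pvStep f) (pvStep f acc (kw, i, c)))
            ≤ pvMr (pvStep f acc (kw, i, c)) :=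
            pvMr_foldl_le f L (fun s hs => hL s (List.mem_cons_of_mem _ hs)) _
        _ ≤ i := pvMr_step_le_rank f acc (kw, i, c) hf
    · exact ih (fun s hs => hL s (List.mem_cons_of_mem _ hs)) hmem' _

theorem le_pvMr_foldl (f : String → Bool) (L : List (String × Nat × String)) (i : Nat)
    (hL : ∀ r ∈ L, f r.1 = true → i ≤ r.2.1) (acc : Option (Nat × String))
    (hacc : i ≤ pvMr acc) : i ≤ pvMr (L.foldl (pvStep f) acc) := by
  induction L generalizing acc with
  | nil => exact hacc
  | cons r L ih =>
    refine ih (fun s hs => hL s (List.mem_cons_of_mem _ hs)) _ ?_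
    unfold pvStep
    split_ifs with h
    · simp only [Bool.and_eq_true] at h
      simpa [pvMr] using hL r (List.mem_cons_self ..) h.1
    · exact hacc

theorem pvFoldl_good (rc : Nat → String) (f : String → Bool) (L : List (String × Nat × String))
    (hL : ∀ r ∈ L, r.2.2 = rc r.2.1) (acc : Option (Nat × String))
    (hacc : acc = none ∨ ∃ br, acc = some (br, rc br)) :
    L.foldl (pvStep f) acc = none ∨ ∃ br, L.foldl (pvStep f) acc = some (br, rc br) := by
  induction L generalizing acc with
  | nil => exact hacc
  | cons r L ih =>
    refine ih (fun s hs => hL s (List.mem_cons_of_mem _ hs)) _ ?_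
    unfold pvStep
    split_ifs with h
    · exact Or.inr ⟨r.2.1, by rw [← hL r (List.mem_cons_self ..)]⟩
    · exact hacc

theorem pvResult_eq (rc : Nat → String) (R : Option (Nat × String))
    (hgood : R = none ∨ ∃ br, R = some (br, rc br)) (i : Nat) (hi : pvMr R = i)
    (hlt : i < 1000) : R = some (i, rc i) := by
  rcases hgood with h | ⟨br, h⟩
  · subst h; simp [pvMr] at hi; omega
  · subst h
    simp [pvMr] at hi
    subst hi; rfl

theorem pvFoldl_id (f : String → Bool) (L : List (String × Nat × String))
    (h : ∀ r ∈ L, f r.1 = false) (acc : Option (Nat × String)) :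
    L.foldl (pvStep f) acc = acc := by
  induction L generalizing acc with
  | nil => rfl
  | cons r L ih =>
    have hr := h r (List.mem_cons_self ..)
    have : pvStep f acc r = acc := by unfold pvStep; simp [hr]
    rw [List.foldl_cons, this]
    exact ih (fun s hs => h s (List.mem_cons_of_mem _ hs)) acc

theorem pvRanks_ge_1 (g : String → Bool) (h0_0 : g "southwest florida comfort" = false) (h0_1 : g "swfl comfort" = false) :
    ∀ r ∈ pvKeywords, g r.1 = true → 1 ≤ r.2.1 := by
  intro r hr hx
  simp only [pvKeywords, List.mem_cons, List.not_mem_nil, or_false] at hr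
  rcases hr with rfl|rfl|rfl|rfl|rfl|rfl|rfl|rfl|rfl|rfl|rfl|rfl|rfl|rfl|rfl|rfl|rfl|rfl <;> simp_all

theorem pvRanks_ge_2 (g : String → Bool) (h0_0 : g "southwest florida comfort" = false) (h0_1 : g "swfl comfort" = false) (h1_0 : g "marceau solutions" = false) (h1_1 : g "marceau" = false) :
    ∀ r ∈ pvKeywords, g r.1 = true → 2 ≤ r.2.1 := by
  intro r hr hx
  simp only [pvKeywords, List.mem_cons, List.not_mem_nil, or_false] at hr
  rcases hr with rfl|rfl|rfl|rfl|rfl|rfl|rfl|rfl|rfl|rfl|rfl|rfl|rfl|rfl|rfl|rfl|rfl|rfl <;> simp_all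

theorem pvRanks_ge_3 (g : String → Bool) (h0_0 : g "southwest florida comfort" = false) (h0_1 : g "swfl comfort" = false) (h1_0 : g "marceau solutions" = false) (h1_1 : g "marceau" = false) (h2_0 : g "footer shipping" = false) (h2_1 : g "footer" = false) :
    ∀ r ∈ pvKeywords, g r.1 = true → 3 ≤ r.2.1 := by
  intro r hr hx
  simp only [pvKeywords, List.mem_cons, List.not_mem_nil, or_false] at hr
  rcases hr with rfl|rfl|rfl|rfl|rfl|rfl|rfl|rfl|rfl|rfl|rfl|rfl|rfl|rfl|rfl|rfl|rfl|rfl <;> simp_all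

theorem pvRanks_ge_4 (g : String → Bool) (h0_0 : g "southwest florida comfort" = false) (h0_1 : g "swfl comfort" = false) (h1_0 : g "marceau solutions" = false) (h1_1 : g "marceau" = false) (h2_0 : g "footer shipping" = false) (h2_1 : g "footer" = false) (h3_0 : g "hvac" = false) (h3_1 : g "air conditioning" = false) (h3_2 : g "heating" = false) (h3_3 : g "ac repair" = false) :
    ∀ r ∈ pvKeywords, g r.1 = true → 4 ≤ r.2.1 := by
  intro r hr hx
  simp only [pvKeywords, List.mem_cons, List.not_mem_nil, or_false] at hr
  rcases hr with rfl|rfl|rfl|rfl|rfl|rfl|rfl|rfl|rfl|rfl|rfl|rfl|rfl|rfl|rfl|rfl|rfl|rfl <;> simp_all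

theorem pvRanks_ge_5 (g : String → Bool) (h0_0 : g "southwest florida comfort" = false) (h0_1 : g "swfl comfort" = false) (h1_0 : g "marceau solutions" = false) (h1_1 : g "marceau" = false) (h2_0 : g "footer shipping" = false) (h2_1 : g "footer" = false) (h3_0 : g "hvac" = false) (h3_1 : g "air conditioning" = false) (h3_2 : g "heating" = false) (h3_3 : g "ac repair" = false) (h4_0 : g "e-commerce" = false) (h4_1 : g "shopify" = false) (h4_2 : g "amazon seller" = false) (h4_3 : g "online store" = false) :
    ∀ r ∈ pvKeywords, g r.1 = true → 5 ≤ r.2.1 := by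
  intro r hr hx
  simp only [pvKeywords, List.mem_cons, List.not_mem_nil, or_false] at hr
  rcases hr with rfl|rfl|rfl|rfl|rfl|rfl|rfl|rfl|rfl|rfl|rfl|rfl|rfl|rfl|rfl|rfl|rfl|rfl <;> simp_all

theorem pvAll_false (g : String → Bool) (h0_0 : g "southwest florida comfort" = false) (h0_1 : g "swfl comfort" = false) (h1_0 : g "marceau solutions" = false) (h1_1 : g "marceau" = false) (h2_0 : g "footer shipping" = false) (h2_1 : g "footer" = false) (h3_0 : g "hvac" = false) (h3_1 : g "air conditioning" = false) (h3_2 : g "heating" = false) (h3_3 : g "ac repair" = false) (h4_0 : g "e-commerce" = false) (h4_1 : g "shopify" = false) (h4_2 : g "amazon seller" = false) (h4_3 : g "online store" = false) (h5_0 : g "restaurant" = false) (h5_1 : g "gym" = false) (h5_2 : g "fitness" = false) (h5_3 : g "small business" = false) :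
    ∀ r ∈ pvKeywords, g r.1 = false := by
  intro r hr
  simp only [pvKeywords, List.mem_cons, List.not_mem_nil, or_false] at hr
  rcases hr with rfl|rfl|rfl|rfl|rfl|rfl|rfl|rfl|rfl|rfl|rfl|rfl|rfl|rfl|rfl|rfl|rfl|rfl <;> simp_all

-- ===== VERDICT (by name: the statement is the Claim_ definition above) =====
theorem detect_company_from_prompt_spec : Claim_equal_detect_company_from_prompt := by
  intro prompt _
  unfold Spec_detect_company_from_prompt detect_company_from_prompt detect_company_from_prompt_alt
  simp only [List.any_cons, List.any_nil, Bool.or_false]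
  set pl := PySem.Str.lower prompt with hpl
  set pf : String → Bool := fun k => PySem.Str.isIn k pl with hpf
  have hstep : (fun (best : Option (Nat × String)) (r : String × Nat × String) =>
      if PySem.Str.isIn r.1 pl &&
         (match best with | none => true | some p => decide (r.2.1 < p.1)) then some r.2 else best)
      = pvStep pf := rfl
  rw [hstep]
  have h1000 : ∀ r ∈ pvKeywords, r.2.1 ≤ 1000 := by decide
  have hrc : ∀ r ∈ pvKeywords, r.2.2 = pvRc r.2.1 := by decide
  have hgood := pvFoldl_good pvRc pf pvKeywords hrc none (Or.inl rfl)
  set R := pvKeywords.foldl (pvStep pf) none with hR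
  by_cases g0 : PySem.Str.isIn "southwest florida comfort" pl = true ∨ PySem.Str.isIn "swfl comfort" pl = true
  · have hle : pvMr R ≤ 0 := by
      rcases g0 with h|h
      · exact pvMr_foldl_le_of_mem pf pvKeywords h1000 "southwest florida comfort" 0 "southwest_florida_comfort" (by decide) h none
      · exact pvMr_foldl_le_of_mem pf pvKeywords h1000 "swfl comfort" 0 "southwest_florida_comfort" (by decide) h none
    have hge : (0 : Nat) ≤ pvMr R := Nat.zero_le _
    have hReq : R = some (0, pvRc 0) := pvResult_eq pvRc R hgood 0 (by omega) (by omega)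
    rw [hReq]
    rcases g0 with h|h <;> simp at h <;> simp [h, pvRc]
  push Not at g0
  have ff0_0 : PySem.Str.isIn "southwest florida comfort" pl = false := Bool.eq_false_iff.mpr g0.1
  simp at ff0_0
  have ff0_1 : PySem.Str.isIn "swfl comfort" pl = false := Bool.eq_false_iff.mpr g0.2
  simp at ff0_1
  by_cases g1 : PySem.Str.isIn "marceau solutions" pl = true ∨ PySem.Str.isIn "marceau" pl = true
  · have hle : pvMr R ≤ 1 := by
      rcases g1 with h|h
      · exact pvMr_foldl_le_of_mem pf pvKeywords h1000 "marceau solutions" 1 "marceau_solutions" (by decide) h none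
      · exact pvMr_foldl_le_of_mem pf pvKeywords h1000 "marceau" 1 "marceau_solutions" (by decide) h none
    have hge : (1 : Nat) ≤ pvMr R :=
      le_pvMr_foldl pf pvKeywords 1 (pvRanks_ge_1 pf ff0_0 ff0_1) none (by norm_num [pvMr])
    have hReq : R = some (1, pvRc 1) := pvResult_eq pvRc R hgood 1 (by omega) (by omega)
    rw [hReq]
    rcases g1 with h|h <;> simp at h <;> simp [h, ff0_0, ff0_1, pvRc]
  push Not at g1
  have ff1_0 : PySem.Str.isIn "marceau solutions" pl = false := Bool.eq_false_iff.mpr g1.1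
  simp at ff1_0
  have ff1_1 : PySem.Str.isIn "marceau" pl = false := Bool.eq_false_iff.mpr g1.2
  simp at ff1_1
  by_cases g2 : PySem.Str.isIn "footer shipping" pl = true ∨ PySem.Str.isIn "footer" pl = true
  · have hle : pvMr R ≤ 2 := by
      rcases g2 with h|h
      · exact pvMr_foldl_le_of_mem pf pvKeywords h1000 "footer shipping" 2 "footer_shipping" (by decide) h none
      · exact pvMr_foldl_le_of_mem pf pvKeywords h1000 "footer" 2 "footer_shipping" (by decide) h none
    have hge : (2 : Nat) ≤ pvMr R :=
      le_pvMr_foldl pf pvKeywords 2 (pvRanks_ge_2 pf ff0_0 ff0_1 ff1_0 ff1_1) none (by norm_num [pvMr])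
    have hReq : R = some (2, pvRc 2) := pvResult_eq pvRc R hgood 2 (by omega) (by omega)
    rw [hReq]
    rcases g2 with h|h <;> simp at h <;> simp [h, ff0_0, ff0_1, ff1_0, ff1_1, pvRc]
  push Not at g2
  have ff2_0 : PySem.Str.isIn "footer shipping" pl = false := Bool.eq_false_iff.mpr g2.1
  simp at ff2_0
  have ff2_1 : PySem.Str.isIn "footer" pl = false := Bool.eq_false_iff.mpr g2.2
  simp at ff2_1
  by_cases g3 : PySem.Str.isIn "hvac" pl = true ∨ PySem.Str.isIn "air conditioning" pl = true ∨ PySem.Str.isIn "heating" pl = true ∨ PySem.Str.isIn "ac repair" pl = true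
  · have hle : pvMr R ≤ 3 := by
      rcases g3 with h|h|h|h
      · exact pvMr_foldl_le_of_mem pf pvKeywords h1000 "hvac" 3 "southwest_florida_comfort" (by decide) h none
      · exact pvMr_foldl_le_of_mem pf pvKeywords h1000 "air conditioning" 3 "southwest_florida_comfort" (by decide) h none
      · exact pvMr_foldl_le_of_mem pf pvKeywords h1000 "heating" 3 "southwest_florida_comfort" (by decide) h none
      · exact pvMr_foldl_le_of_mem pf pvKeywords h1000 "ac repair" 3 "southwest_florida_comfort" (by decide) h none
    have hge : (3 : Nat) ≤ pvMr R :=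
      le_pvMr_foldl pf pvKeywords 3 (pvRanks_ge_3 pf ff0_0 ff0_1 ff1_0 ff1_1 ff2_0 ff2_1) none (by norm_num [pvMr])
    have hReq : R = some (3, pvRc 3) := pvResult_eq pvRc R hgood 3 (by omega) (by omega)
    rw [hReq]
    rcases g3 with h|h|h|h <;> simp at h <;> simp [h, ff0_0, ff0_1, ff1_0, ff1_1, ff2_0, ff2_1, pvRc]
  push Not at g3
  have ff3_0 : PySem.Str.isIn "hvac" pl = false := Bool.eq_false_iff.mpr g3.1
  simp at ff3_0
  have ff3_1 : PySem.Str.isIn "air conditioning" pl = false := Bool.eq_false_iff.mpr g3.2.1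
  simp at ff3_1
  have ff3_2 : PySem.Str.isIn "heating" pl = false := Bool.eq_false_iff.mpr g3.2.2.1
  simp at ff3_2
  have ff3_3 : PySem.Str.isIn "ac repair" pl = false := Bool.eq_false_iff.mpr g3.2.2.2
  simp at ff3_3
  by_cases g4 : PySem.Str.isIn "e-commerce" pl = true ∨ PySem.Str.isIn "shopify" pl = true ∨ PySem.Str.isIn "amazon seller" pl = true ∨ PySem.Str.isIn "online store" pl = true
  · have hle : pvMr R ≤ 4 := by
      rcases g4 with h|h|h|h
      · exact pvMr_foldl_le_of_mem pf pvKeywords h1000 "e-commerce" 4 "footer_shipping" (by decide) h none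
      · exact pvMr_foldl_le_of_mem pf pvKeywords h1000 "shopify" 4 "footer_shipping" (by decide) h none
      · exact pvMr_foldl_le_of_mem pf pvKeywords h1000 "amazon seller" 4 "footer_shipping" (by decide) h none
      · exact pvMr_foldl_le_of_mem pf pvKeywords h1000 "online store" 4 "footer_shipping" (by decide) h none
    have hge : (4 : Nat) ≤ pvMr R :=
      le_pvMr_foldl pf pvKeywords 4 (pvRanks_ge_4 pf ff0_0 ff0_1 ff1_0 ff1_1 ff2_0 ff2_1 ff3_0 ff3_1 ff3_2 ff3_3) none (by norm_num [pvMr])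
    have hReq : R = some (4, pvRc 4) := pvResult_eq pvRc R hgood 4 (by omega) (by omega)
    rw [hReq]
    rcases g4 with h|h|h|h <;> simp at h <;> simp [h, ff0_0, ff0_1, ff1_0, ff1_1, ff2_0, ff2_1, ff3_0, ff3_1, ff3_2, ff3_3, pvRc]
  push Not at g4
  have ff4_0 : PySem.Str.isIn "e-commerce" pl = false := Bool.eq_false_iff.mpr g4.1
  simp at ff4_0
  have ff4_1 : PySem.Str.isIn "shopify" pl = false := Bool.eq_false_iff.mpr g4.2.1
  simp at ff4_1
  have ff4_2 : PySem.Str.isIn "amazon seller" pl = false := Bool.eq_false_iff.mpr g4.2.2.1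
  simp at ff4_2
  have ff4_3 : PySem.Str.isIn "online store" pl = false := Bool.eq_false_iff.mpr g4.2.2.2
  simp at ff4_3
  by_cases g5 : PySem.Str.isIn "restaurant" pl = true ∨ PySem.Str.isIn "gym" pl = true ∨ PySem.Str.isIn "fitness" pl = true ∨ PySem.Str.isIn "small business" pl = true
  · have hle : pvMr R ≤ 5 := by
      rcases g5 with h|h|h|h
      · exact pvMr_foldl_le_of_mem pf pvKeywords h1000 "restaurant" 5 "marceau_solutions" (by decide) h none
      · exact pvMr_foldl_le_of_mem pf pvKeywords h1000 "gym" 5 "marceau_solutions" (by decide) h none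
      · exact pvMr_foldl_le_of_mem pf pvKeywords h1000 "fitness" 5 "marceau_solutions" (by decide) h none
      · exact pvMr_foldl_le_of_mem pf pvKeywords h1000 "small business" 5 "marceau_solutions" (by decide) h none
    have hge : (5 : Nat) ≤ pvMr R :=
      le_pvMr_foldl pf pvKeywords 5 (pvRanks_ge_5 pf ff0_0 ff0_1 ff1_0 ff1_1 ff2_0 ff2_1 ff3_0 ff3_1 ff3_2 ff3_3 ff4_0 ff4_1 ff4_2 ff4_3) none (by norm_num [pvMr])
    have hReq : R = some (5, pvRc 5) := pvResult_eq pvRc R hgood 5 (by omega) (by omega)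
    rw [hReq]
    rcases g5 with h|h|h|h <;> simp at h <;> simp [h, ff0_0, ff0_1, ff1_0, ff1_1, ff2_0, ff2_1, ff3_0, ff3_1, ff3_2, ff3_3, ff4_0, ff4_1, ff4_2, ff4_3, pvRc]
  push Not at g5
  have ff5_0 : PySem.Str.isIn "restaurant" pl = false := Bool.eq_false_iff.mpr g5.1
  simp at ff5_0
  have ff5_1 : PySem.Str.isIn "gym" pl = false := Bool.eq_false_iff.mpr g5.2.1
  simp at ff5_1
  have ff5_2 : PySem.Str.isIn "fitness" pl = false := Bool.eq_false_iff.mpr g5.2.2.1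
  simp at ff5_2
  have ff5_3 : PySem.Str.isIn "small business" pl = false := Bool.eq_false_iff.mpr g5.2.2.2
  simp at ff5_3
  have hnone : R = none := pvFoldl_id pf pvKeywords (pvAll_false pf ff0_0 ff0_1 ff1_0 ff1_1 ff2_0 ff2_1 ff3_0 ff3_1 ff3_2 ff3_3 ff4_0 ff4_1 ff4_2 ff4_3 ff5_0 ff5_1 ff5_2 ff5_3) none
  rw [hnone]
  simp [ff0_0, ff0_1, ff1_0, ff1_1, ff2_0, ff2_1, ff3_0, ff3_1, ff3_2, ff3_3, ff4_0, ff4_1, ff4_2, ff4_3, ff5_0, ff5_1, ff5_2, ff5_3]
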